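-- pv_equiv track=rewrite | github.com/MArucd/python-base | python/src/exercise5/task5.py | kolvo_posle
-- ===== SOURCE A (Python) =====
-- def kolvo_posle(data):
--     row = []
--     rev = data[::-1]
--     for count in rev:
--         if count == '.':
--             break
--         row.append(count)
--     posle_tochki = ''.join(row)
--     return len(posle_tochki)
-- ===== SOURCE B (Python) =====
-- def kolvo_posle(data):
--     return len(data) - data.rfind('.') - 1
-- ===== Notes on version B (the rewrite author's own statement) =====
-- stated objective: simpler
-- what changed: Replaced the reverse + char-by-char loop + join with a single rfind of the last dot and index arithmetic (rfind's -1 on no dot yields len(data) exactly as A's full scan).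
import Mathlib
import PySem

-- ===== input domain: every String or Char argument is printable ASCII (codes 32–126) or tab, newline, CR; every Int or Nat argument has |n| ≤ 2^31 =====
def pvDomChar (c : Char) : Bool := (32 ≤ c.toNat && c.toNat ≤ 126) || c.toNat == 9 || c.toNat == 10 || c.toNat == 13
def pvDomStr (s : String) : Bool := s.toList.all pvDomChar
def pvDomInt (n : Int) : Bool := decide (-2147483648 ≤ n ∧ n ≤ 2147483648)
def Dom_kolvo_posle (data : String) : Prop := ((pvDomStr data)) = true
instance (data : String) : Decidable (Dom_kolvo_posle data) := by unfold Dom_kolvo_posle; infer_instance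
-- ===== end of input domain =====

-- B replaces A's reverse + char loop + join with one rfind of the last dot and index arithmetic (simpler).


-- ===== PORT A =====
-- the 'for count in rev: if count == '.': break; row.append(count)' loop
def kolvoLoop : List Char → List Char → List Char
  | [], row => row
  | c :: rest, row => if c = '.' then row else kolvoLoop rest (row ++ [c])

def kolvo_posle (data : String) : Int :=
  -- data[::-1]: step is the literal -1, so slice? never returns none; .getD "" is only totalisation
  let rev := (PySem.Str.slice? data none none (-1)).getD ""
  let row := kolvoLoop rev.toList []
  -- ''.join(row) where row is a list of 1-char strings
  let posle_tochki := PySem.Str.join "" (row.map (fun c => String.ofList [c]))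
  PySem.Str.len posle_tochki

-- ===== PORT B =====
def kolvo_posle_alt (data : String) : Int :=
  PySem.Str.len data - PySem.Str.rfind data "." - 1

-- ===== PRECONDITION & SPEC =====
def Spec_kolvo_posle (data : String) (out : Int) : Prop := out = kolvo_posle_alt data
instance (data : String) (out : Int) : Decidable (Spec_kolvo_posle data out) := by unfold Spec_kolvo_posle; infer_instance

-- ===== CLAIM (what is proved, stated in full; the proofs are below) =====
def Claim_equal_kolvo_posle : Prop := ∀ (data : String), Dom_kolvo_posle data → Spec_kolvo_posle data (kolvo_posle data)

-- ===== LEMMAS AND PROOFS =====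

theorem kolvoLoop_eq (cs row : List Char) :
    kolvoLoop cs row = row ++ cs.takeWhile (fun c => !(c == '.')) := by
  induction cs generalizing row with
  | nil => simp [kolvoLoop]
  | cons c rest ih =>
    by_cases h : c = '.'
    · simp [kolvoLoop, h]
    · simp [kolvoLoop, h, ih]

theorem isPrefixOf_dot (xs : List Char) :
    ['.'].isPrefixOf xs = true ↔ xs.head? = some '.' := by
  cases xs with
  | nil => decide
  | cons y ys =>
    show ((('.' == y) && List.isPrefixOf ([] : List Char) ys) = true) ↔ _
    have hnilpre : List.isPrefixOf ([] : List Char) ys = true := rfl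
    simp only [hnilpre, Bool.and_true, beq_iff_eq, List.head?_cons, Option.some.injEq]
    exact eq_comm

theorem go_zero (l : List Char) :
    PySem.Chars.rfind.go l ['.'] 0 = if ['.'].isPrefixOf l then 0 else -1 := rfl

theorem go_succ (l : List Char) (j : Nat) :
    PySem.Chars.rfind.go l ['.'] (j + 1) =
      if ['.'].isPrefixOf (l.drop (j + 1)) then ((j : Int) + 1) else PySem.Chars.rfind.go l ['.'] j := by
  rfl

-- rfind.go at counter n (n < l.length) returns n minus the trailing non-dot run of l.take (n+1)
theorem rfind_go_spec (l : List Char) (n : Nat) (hn : n < l.length) :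
    PySem.Chars.rfind.go l ['.'] n =
      (n : Int) - ((l.take (n + 1)).reverse.takeWhile (fun c => !(c == '.'))).length := by
  induction n with
  | zero =>
    obtain ⟨a, rest, rfl⟩ : ∃ a rest, l = a :: rest := by
      cases l with
      | nil => simp at hn
      | cons a rest => exact ⟨a, rest, rfl⟩
    rw [go_zero]
    by_cases h : a = '.'
    · rw [if_pos (by rw [isPrefixOf_dot]; simp [h])]
      simp [h]
    · rw [if_neg (by rw [isPrefixOf_dot]; simpa using h)]
      simp [h]
  | succ n ih =>
    have hhead : (l.drop (n + 1)).head? = l[n + 1]? := by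
      rw [List.head?_drop]
    have hget : ∃ a, l[n + 1]? = some a := ⟨l[n + 1], List.getElem?_eq_getElem hn⟩
    obtain ⟨a, ha⟩ := hget
    have htake : l.take (n + 1 + 1) = l.take (n + 1) ++ [a] := by
      rw [List.take_add_one, ha]; rfl
    by_cases h : a = '.'
    · have hpre : ['.'].isPrefixOf (l.drop (n + 1)) = true := by
        rw [isPrefixOf_dot, hhead, ha, h]
      rw [go_succ, hpre, if_pos rfl, htake]
      simp [h]
    · have hpre : ['.'].isPrefixOf (l.drop (n + 1)) = false := by
        rw [Bool.eq_false_iff]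
        intro hc
        rw [isPrefixOf_dot, hhead, ha] at hc
        exact h (Option.some.inj hc)
      rw [go_succ, hpre, if_neg (by simp), ih (Nat.lt_of_succ_lt hn), htake]
      simp [h]

theorem rfind_dot_spec (l : List Char) :
    PySem.Chars.rfind l ['.'] =
      (l.length : Int) - (l.reverse.takeWhile (fun c => !(c == '.'))).length - 1 := by
  cases l with
  | nil => decide
  | cons a rest =>
    have hlen : (a :: rest).length = rest.length + 1 := rfl
    have hdrop : (a :: rest).drop (rest.length + 1) = [] := by
      simp
    unfold PySem.Chars.rfind
    rw [hlen]
    have hpre : ['.'].isPrefixOf ((a :: rest).drop (rest.length + 1)) = false := by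
      rw [hdrop]; rfl
    rw [go_succ, hpre, if_neg (by simp)]
    rw [rfind_go_spec (a :: rest) rest.length (by simp)]
    have : (a :: rest).take (rest.length + 1) = a :: rest := by
      simp
    rw [this]
    push_cast
    omega

-- ===== VERDICT (by name: the statement is the Claim_ definition above) =====
theorem kolvo_posle_spec : Claim_equal_kolvo_posle := by
  intro data _
  unfold Spec_kolvo_posle kolvo_posle kolvo_posle_alt
  rw [PySem.Str.slice?_none_none_neg_one]
  simp only [Option.getD_some, kolvoLoop_eq, List.nil_append, PySem.Str.rfind_eq,
    PySem.Str.len_eq, PySem.Str.toList_join, List.map_map]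
  have hnil : ("".toList : List Char) = [] := rfl
  rw [hnil]
  have hcomp : (String.toList ∘ fun c => String.ofList [c]) = fun c : Char => [c] := by
    funext c; simp
  rw [hcomp, PySem.Chars.join_nil_singletons]
  have hrev : (String.ofList data.toList.reverse).toList = data.toList.reverse := by simp
  have hdot : (".".toList : List Char) = ['.'] := rfl
  rw [hrev, hdot, rfind_dot_spec data.toList]
  have hle : (data.toList.reverse.takeWhile (fun c => !(c == '.'))).length
      ≤ data.toList.length := by
    calc _ ≤ data.toList.reverse.length := (data.toList.reverse.takeWhile_sublist _).length_le
      _ = data.toList.length := List.length_reverse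
  omega
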